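-- pv_equiv track=rewrite | github.com/Weyaaron/export_from_ovy | src/mine.py | filter_times
-- ===== SOURCE A (Python) =====
-- from typing import List
--
-- def filter_times(triples) -> List:
--     past_index = False
--     temp_list = []
--
--     for tuple_el in triples:
--         # rather hacky, might break
--         if "," in tuple_el[2]:
--             past_index = False
--         if past_index:
--             temp_list.append(tuple_el)
--         if tuple_el[2] == "UHRZEIT":
--             past_index = True
--
--     result = []
--     for i in range(0, len(temp_list) - 1, 2):
--         final_temp = temp_list[i][2] + temp_list[i + 1][2]
--         result.append((temp_list[i][0], temp_list[i][1], final_temp))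
--
--     return result
-- ===== SOURCE B (Python) =====
-- def filter_times(triples):
--     past_index = False
--     pending = None
--     result = []
--     for row in triples:
--         if "," in row[2]:
--             past_index = False
--         if past_index:
--             if pending is None:
--                 pending = row
--             else:
--                 result.append((pending[0], pending[1], pending[2] + row[2]))
--                 pending = None
--         if row[2] == "UHRZEIT":
--             past_index = True
--     return result
-- ===== Notes on version B (the rewrite author's own statement) =====
-- stated objective: alternative
-- what changed: Replaced A's two-pass design (collect an intermediate temp_list, then a second index loop over range(0,len-1,2) pairing rows) by a single streaming pass that keeps one 'pending' row and emits each completed pair immediately, discarding a leftover pending row.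
import Mathlib
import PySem

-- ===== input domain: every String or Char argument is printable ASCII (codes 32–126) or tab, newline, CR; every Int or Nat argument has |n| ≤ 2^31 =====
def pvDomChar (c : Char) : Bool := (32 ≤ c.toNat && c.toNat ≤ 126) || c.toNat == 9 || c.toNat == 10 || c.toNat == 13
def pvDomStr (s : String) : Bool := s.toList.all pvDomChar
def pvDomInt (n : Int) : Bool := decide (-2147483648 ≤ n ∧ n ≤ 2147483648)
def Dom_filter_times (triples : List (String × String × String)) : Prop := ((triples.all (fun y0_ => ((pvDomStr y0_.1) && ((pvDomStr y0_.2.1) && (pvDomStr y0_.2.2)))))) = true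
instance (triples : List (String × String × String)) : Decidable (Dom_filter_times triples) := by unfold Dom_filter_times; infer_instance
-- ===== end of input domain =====

-- B changes the decomposition (one streaming pass with a pending holder instead of
-- collect-then-pair); same O(n) cost, return values proved equal on all inputs.

-- ===== PORT A =====
-- A's first loop body: comma-reset, conditional append to temp_list, UHRZEIT-set.
def stepA (st : Bool × List (String × String × String)) (t : String × String × String) :
    Bool × List (String × String × String) :=
  let past1 := if PySem.Str.isIn "," t.2.2 then false else st.1
  let temp := if past1 then st.2 ++ [t] else st.2
  let past2 := if t.2.2 == "UHRZEIT" then true else past1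
  (past2, temp)

-- A's second loop body: result.append((temp[i][0], temp[i][1], temp[i][2] + temp[i+1][2]))
def pairLoopBody (temp : List (String × String × String))
    (res : List (String × String × String)) (i : Int) : List (String × String × String) :=
  let final := (PySem.List.pyGetD temp i ("", "", "")).2.2 ++ (PySem.List.pyGetD temp (i + 1) ("", "", "")).2.2
  res ++ [((PySem.List.pyGetD temp i ("", "", "")).1, (PySem.List.pyGetD temp i ("", "", "")).2.1, final)]

def filter_times (triples : List (String × String × String)) : List (String × String × String) :=
  let temp := (triples.foldl stepA (false, [])).2
  (PySem.List.pyRange 0 ((temp.length : Int) - 1) 2).foldl (pairLoopBody temp) []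

-- ===== PORT B =====
-- B's single loop body: same guard order, but pairs are emitted on the fly via 'pending'.
def stepB (st : Bool × Option (String × String × String) × List (String × String × String))
    (row : String × String × String) :
    Bool × Option (String × String × String) × List (String × String × String) :=
  let past1 := if PySem.Str.isIn "," row.2.2 then false else st.1
  let pr : Option (String × String × String) × List (String × String × String) :=
    if past1 then
      match st.2.1 with
      | none => (some row, st.2.2)
      | some p => (none, st.2.2 ++ [(p.1, p.2.1, p.2.2 ++ row.2.2)])
    else st.2
  let past2 := if row.2.2 == "UHRZEIT" then true else past1
  (past2, pr)

def filter_times_alt (triples : List (String × String × String)) : List (String × String × String) :=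
  (triples.foldl stepB (false, none, [])).2.2

-- ===== PRECONDITION & SPEC =====
def Spec_filter_times (triples : List (String × String × String)) (out : List (String × String × String)) : Prop := out = filter_times_alt triples
instance (triples : List (String × String × String)) (out : List (String × String × String)) : Decidable (Spec_filter_times triples out) := by unfold Spec_filter_times; infer_instance

-- ===== CLAIM (what is proved, stated in full; the proofs are below) =====
def Claim_equal_filter_times : Prop := ∀ (triples : List (String × String × String)), Dom_filter_times triples → Spec_filter_times triples (filter_times triples)

-- ===== LEMMAS AND PROOFS =====

-- The pairing of consecutive rows that A's second loop computes.
def pairUp : List (String × String × String) → List (String × String × String)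
  | a :: b :: rest => (a.1, a.2.1, a.2.2 ++ b.2.2) :: pairUp rest
  | _ => []

theorem pairUp_short (l : List (String × String × String)) (h : l.length ≤ 1) :
    pairUp l = [] := by
  match l with
  | [] => rfl
  | [_] => rfl
  | _ :: _ :: _ => simp at h

theorem pyRange2_nil (a b : Int) (h : b ≤ a) : PySem.List.pyRange a b 2 = [] := by
  rw [PySem.List.pyRange_of_pos a b (by norm_num)]
  simp [if_neg (not_lt.2 h)]

theorem pyRange2_cons (a b : Int) (h : a < b) :
    PySem.List.pyRange a b 2 = a :: PySem.List.pyRange (a + 2) b 2 := by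
  rw [PySem.List.pyRange_of_pos a b (by norm_num),
      PySem.List.pyRange_of_pos (a + 2) b (by norm_num)]
  rw [if_pos h]
  have hc : ((b - a + 2 - 1) / 2).toNat =
      (if a + 2 < b then ((b - (a + 2) + 2 - 1) / 2).toNat else 0) + 1 := by
    split_ifs with h2 <;> omega
  rw [hc, List.range_succ_eq_map]
  simp only [List.map_cons, Nat.cast_zero, mul_zero, add_zero, List.map_map]
  congr 1
  apply List.map_congr_left
  intro k _
  simp only [Function.comp]
  push_cast
  ring

-- Pointwise evaluation of A's first-loop body, per case.
theorem stepA_comma (st : Bool × List (String × String × String)) (t : String × String × String)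
    (h : PySem.Str.isIn "," t.2.2 = true) :
    stepA st t = ((t.2.2 == "UHRZEIT"), st.2) := by
  simp only [stepA, h, if_true, Bool.false_eq_true, if_false  ]
  cases t.2.2 == "UHRZEIT" <;> rfl

theorem stepA_nc_false (temp : List (String × String × String)) (t : String × String × String)
    (h : PySem.Str.isIn "," t.2.2 = false) :
    stepA (false, temp) t = ((t.2.2 == "UHRZEIT"), temp) := by
  simp only [stepA, h, Bool.false_eq_true, if_false  ]
  cases t.2.2 == "UHRZEIT" <;> rfl

theorem stepA_nc_true (temp : List (String × String × String)) (t : String × String × String)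
    (h : PySem.Str.isIn "," t.2.2 = false) :
    stepA (true, temp) t = (true, temp ++ [t]) := by
  simp only [stepA, h, Bool.false_eq_true, if_false, if_true, ite_self]

-- Pointwise evaluation of B's loop body, per case.
theorem stepB_comma (st : Bool × Option (String × String × String) × List (String × String × String))
    (row : String × String × String) (h : PySem.Str.isIn "," row.2.2 = true) :
    stepB st row = ((row.2.2 == "UHRZEIT"), st.2) := by
  simp only [stepB, h, if_true, Bool.false_eq_true, if_false  ]
  cases row.2.2 == "UHRZEIT" <;> rfl

theorem stepB_nc_false (pd : Option (String × String × String))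
    (res : List (String × String × String)) (row : String × String × String)
    (h : PySem.Str.isIn "," row.2.2 = false) :
    stepB (false, pd, res) row = ((row.2.2 == "UHRZEIT"), pd, res) := by
  simp only [stepB, h, Bool.false_eq_true, if_false  ]
  cases row.2.2 == "UHRZEIT" <;> rfl

theorem stepB_nc_none (res : List (String × String × String)) (row : String × String × String)
    (h : PySem.Str.isIn "," row.2.2 = false) :
    stepB (true, none, res) row = (true, some row, res) := by
  simp only [stepB, h, Bool.false_eq_true, if_false, if_true, ite_self]

theorem stepB_nc_some (p : String × String × String) (res : List (String × String × String))
    (row : String × String × String) (h : PySem.Str.isIn "," row.2.2 = false) :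
    stepB (true, some p, res) row = (true, none, res ++ [(p.1, p.2.1, p.2.2 ++ row.2.2)]) := by
  simp only [stepB, h, Bool.false_eq_true, if_false, if_true, ite_self]

-- A's second loop, started at index j, pairs up the suffix temp.drop j.
theorem pairLoop_eq_pairUp (k : Nat) : ∀ (temp acc : List (String × String × String)) (j : Nat),
    temp.length ≤ j + k →
    (PySem.List.pyRange (j : Int) ((temp.length : Int) - 1) 2).foldl (pairLoopBody temp) acc
      = acc ++ pairUp (temp.drop j) := by
  induction k with
  | zero =>
    intro temp acc j h
    rw [pyRange2_nil _ _ (by omega)]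
    simp [pairUp_short (temp.drop j) (by simp; omega)]
  | succ k ih =>
    intro temp acc j h
    by_cases hj : j + 1 < temp.length
    · rw [pyRange2_cons _ _ (by omega)]
      simp only [List.foldl_cons]
      have hcast : (j : Int) + 2 = ((j + 2 : Nat) : Int) := by push_cast; ring
      rw [hcast, ih temp _ (j + 2) (by omega)]
      have hj0 : j < temp.length := by omega
      have hg0 : PySem.List.pyGetD temp (j : Int) ("", "", "") = temp[j] := by
        rw [PySem.List.pyGetD_natCast]
        simp [hj0]
      have hg1 : PySem.List.pyGetD temp ((j : Int) + 1) ("", "", "") = temp[j + 1] := by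
        have : (j : Int) + 1 = ((j + 1 : Nat) : Int) := by push_cast; ring
        rw [this, PySem.List.pyGetD_natCast]
        simp [hj]
      have hdrop : temp.drop j = temp[j] :: temp[j + 1] :: temp.drop (j + 2) := by
        rw [List.drop_eq_getElem_cons hj0, List.drop_eq_getElem_cons hj]
      rw [hdrop]
      simp [pairLoopBody, hg0, hg1, pairUp]
    · rw [pyRange2_nil _ _ (by omega)]
      simp [pairUp_short (temp.drop j) (by simp; omega)]

-- temp_list accumulates on the right: the initial accumulator splits off.
theorem stepA_temp_append : ∀ (ts : List (String × String × String)) (past : Bool)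
    (temp : List (String × String × String)),
    (ts.foldl stepA (past, temp)).2 = temp ++ (ts.foldl stepA (past, []) ).2 := by
  intro ts
  induction ts with
  | nil => intro past temp; simp
  | cons t ts ih =>
    intro past temp
    simp only [List.foldl_cons]
    cases hc : PySem.Str.isIn "," t.2.2
    · cases hp : past
      · rw [stepA_nc_false _ _ hc, stepA_nc_false _ _ hc]
        exact ih _ temp
      · rw [stepA_nc_true _ _ hc, stepA_nc_true _ _ hc]
        rw [ih _ (temp ++ [t]), ih _ ([] ++ [t])]
        simp
    · rw [stepA_comma _ _ hc, stepA_comma _ _ hc]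
      exact ih _ temp

-- Main invariant: B's streaming state (pending, result) tracks A's collected list.
theorem main_invariant : ∀ (ts : List (String × String × String)) (past : Bool)
    (pending : Option (String × String × String)) (res : List (String × String × String)),
    (ts.foldl stepB (past, pending, res)).2.2
      = res ++ pairUp (pending.toList ++ (ts.foldl stepA (past, []) ).2) := by
  intro ts
  induction ts with
  | nil =>
    intro past pending res
    cases pending <;> simp [pairUp]
  | cons t ts ih =>
    intro past pending res
    simp only [List.foldl_cons]
    cases hc : PySem.Str.isIn "," t.2.2
    · cases hp : past
      · rw [stepB_nc_false _ _ _ hc, stepA_nc_false _ _ hc]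
        exact ih _ pending res
      · cases pending with
        | none =>
          rw [stepB_nc_none _ _ hc, stepA_nc_true _ _ hc]
          rw [ih _ (some t) res, stepA_temp_append ts _ ([] ++ [t])]
          simp
        | some p =>
          rw [stepB_nc_some _ _ _ hc, stepA_nc_true _ _ hc]
          rw [ih _ none _, stepA_temp_append ts _ ([] ++ [t])]
          simp [pairUp]
    · rw [stepB_comma _ _ hc, stepA_comma _ _ hc]
      exact ih _ pending res

-- ===== VERDICT (by name: the statement is the Claim_ definition above) =====
theorem filter_times_spec : Claim_equal_filter_times := by
  intro triples _
  unfold Spec_filter_times filter_times filter_times_alt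
  rw [main_invariant triples false none []]
  have h0 : (0 : Int) = ((0 : Nat) : Int) := rfl
  rw [h0, pairLoop_eq_pairUp ((triples.foldl stepA (false, [])).2.length) _ [] 0 (by omega)]
  simp
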